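-- pv_equiv track=rewrite | github.com/HduDBSI/Dataset4TD | data_collection/methodSimplifier.py | removePackage
-- ===== SOURCE A (Python) =====
-- def removePackage(type_with_package: str) -> str:
--     """
--     Examples:
--         type_with_package = 'java.util.List<<java.lang.String>,java.util.Set<java.io.File>>'
--         return -> 'List<String>, Set<File>>'
--     """
--     stack = []
--
--     def myPop():
--         while stack and stack[-1] not in '<>,?':
--             stack.pop()
--
--     for ch in type_with_package:
--         # if ch == ' ':
--         #     myPop()
--         # elif ch == '.':
--         #     if stack[-1] == '>':
--         #         stack = []
--         #     else:
--         #         myPop()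
--         if ch in ' .':
--             myPop()
--         else:
--             stack.append(ch)
--
--     return ''.join(stack).replace(',', ', ')
-- ===== SOURCE B (Python) =====
-- def removePackage(type_with_package: str) -> str:
--     # Single backward pass: a '.'/' ' starts a skip of preceding identifier
--     # characters until a '<>,?' delimiter; no stack, no inner pop loop.
--     out = []
--     skipping = False
--     for ch in reversed(type_with_package):
--         if ch in '<>,?':
--             skipping = False
--             out.append(ch)
--         elif ch in '. ':
--             skipping = True
--         elif not skipping:
--             out.append(ch)
--     return ''.join(reversed(out)).replace(',', ', ')
-- ===== Notes on version B (the rewrite author's own statement) =====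
-- stated objective: simpler
-- what changed: Replaced the stack with repeated inner pop-until-delimiter loops by a single backward pass keeping a boolean skip flag that a '.'/' ' sets and a '<>,?' delimiter clears.
import Mathlib
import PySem

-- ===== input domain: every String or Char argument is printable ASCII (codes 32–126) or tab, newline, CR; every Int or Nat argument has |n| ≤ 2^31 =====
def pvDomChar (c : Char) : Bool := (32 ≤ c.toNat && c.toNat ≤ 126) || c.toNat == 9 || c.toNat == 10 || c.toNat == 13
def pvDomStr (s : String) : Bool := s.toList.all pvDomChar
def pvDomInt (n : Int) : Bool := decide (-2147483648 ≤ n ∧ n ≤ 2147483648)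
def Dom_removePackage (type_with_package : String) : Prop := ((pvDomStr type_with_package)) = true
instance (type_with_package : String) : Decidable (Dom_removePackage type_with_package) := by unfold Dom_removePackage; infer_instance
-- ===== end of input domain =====

-- ===== PORT A =====
-- B replaces A's stack + inner pop loop by one backward pass with a skip flag (simpler, no alg. change in cost).
def pvDelims : List Char := ['<', '>', ',', '?']

-- myPop: pop while top not in '<>,?' (stack stored reversed: head = top)
def pvMyPop (stack : List Char) : List Char :=
  stack.dropWhile (fun c => !pvDelims.contains c)

def pvStepA (stack : List Char) (ch : Char) : List Char :=
  if ch = ' ' ∨ ch = '.' then pvMyPop stack else ch :: stack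

def removePackage (type_with_package : String) : String :=
  PySem.Str.replace (String.ofList (type_with_package.toList.foldl pvStepA []).reverse) "," ", "

-- ===== PORT B =====
def pvStepB (acc : List Char × Bool) (ch : Char) : List Char × Bool :=
  if pvDelims.contains ch then (acc.1 ++ [ch], false)
  else if ch = '.' ∨ ch = ' ' then (acc.1, true)
  else if !acc.2 then (acc.1 ++ [ch], acc.2) else acc

def removePackage_alt (type_with_package : String) : String :=
  PySem.Str.replace (String.ofList (type_with_package.toList.reverse.foldl pvStepB ([], false)).1.reverse) "," ", "

-- ===== PRECONDITION & SPEC =====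
def Spec_removePackage (type_with_package : String) (out : String) : Prop := out = removePackage_alt type_with_package
instance (type_with_package : String) (out : String) : Decidable (Spec_removePackage type_with_package out) := by unfold Spec_removePackage; infer_instance

-- ===== CLAIM (what is proved, stated in full; the proofs are below) =====
def Claim_equal_removePackage : Prop := ∀ (type_with_package : String), Dom_removePackage type_with_package → Spec_removePackage type_with_package (removePackage type_with_package)

-- ===== LEMMAS AND PROOFS =====

lemma pvDropWhile_idem (p : Char → Bool) (l : List Char) :
    (l.dropWhile p).dropWhile p = l.dropWhile p := by
  induction l with
  | nil => simp
  | cons c t ih =>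
    by_cases h : p c = true
    · simpa [List.dropWhile_cons, h] using ih
    · simp [h]

-- core: B's backward fold over m equals A's forward fold over m.reverse (with skip = dropWhile)
lemma pvKey (m : List Char) : ∀ (out0 : List Char) (b : Bool),
    (m.foldl pvStepB (out0, b)).1 =
      out0 ++ (if b then (m.reverse.foldl pvStepA []).dropWhile (fun c => !pvDelims.contains c)
               else m.reverse.foldl pvStepA []) := by
  induction m with
  | nil => intro out0 b; cases b <;> simp [List.foldl]
  | cons c t ih =>
    intro out0 b
    have hA : (c :: t).reverse.foldl pvStepA [] = pvStepA (t.reverse.foldl pvStepA []) c := by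
      simp [List.foldl_append]
    rw [List.foldl_cons]
    by_cases hd : pvDelims.contains c = true
    · have hmem : c ∈ pvDelims := by simpa using hd
      have hne : ¬ (c = ' ' ∨ c = '.') := by
        simp [pvDelims] at hd
        rcases hd with h | h | h | h <;> subst h <;> decide
      have hstep : pvStepB (out0, b) c = (out0 ++ [c], false) := by
        simp [pvStepB, hmem]
      rw [hstep, ih]
      rw [hA]
      have : pvStepA (t.reverse.foldl pvStepA []) c = c :: t.reverse.foldl pvStepA [] := by
        simp [pvStepA, hne]
      rw [this]
      cases b
      · simp
      · simp [hmem]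
    · have hnm : c ∉ pvDelims := by simpa using hd
      by_cases hs : (c = '.' ∨ c = ' ')
      · have hsa : (c = ' ' ∨ c = '.') := hs.symm
        have hstep : pvStepB (out0, b) c = (out0, true) := by
          simp [pvStepB, hnm, hs]
        rw [hstep, ih, hA]
        have : pvStepA (t.reverse.foldl pvStepA []) c
            = (t.reverse.foldl pvStepA []).dropWhile (fun x => !pvDelims.contains x) := by
          simp [pvStepA, hsa, pvMyPop]
        rw [this]
        cases b
        · simp
        · simp [pvDropWhile_idem]
      · have hsa : ¬ (c = ' ' ∨ c = '.') := fun h => hs h.symm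
        have hstepA : pvStepA (t.reverse.foldl pvStepA []) c = c :: t.reverse.foldl pvStepA [] := by
          simp [pvStepA, hsa]
        cases b
        · have hstep : pvStepB (out0, false) c = (out0 ++ [c], false) := by
            simp [pvStepB, hnm, hs]
          rw [hstep, ih, hA, hstepA]
          simp
        · have hstep : pvStepB (out0, true) c = (out0, true) := by
            simp [pvStepB, hnm, hs]
          rw [hstep, ih, hA, hstepA]
          simp [hnm]

-- ===== VERDICT (by name: the statement is the Claim_ definition above) =====
theorem removePackage_spec : Claim_equal_removePackage := by
  intro s _
  unfold Spec_removePackage removePackage removePackage_alt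
  have h := pvKey s.toList.reverse [] false
  simp only [List.reverse_reverse, if_neg Bool.false_ne_true, List.nil_append] at h
  rw [h]
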